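-- pv_equiv track=rewrite | github.com/Pranav-0710/DataEngEnv | app/graders/grader3.py | _detect_fit_after_split
-- ===== SOURCE A (Python) =====
-- def _detect_fit_after_split(script: str) -> bool:
--     lines = script.split('\n')
--     # Strip import lines and comments entirely
--     code_lines = [
--         l for l in lines
--         if not l.strip().startswith('import')
--         and not l.strip().startswith('from')
--         and not l.strip().startswith('#')
--         and l.strip() != ''
--     ]
--     code_only = '\n'.join(code_lines)
--
--     fit_pos = code_only.find('scaler.fit')
--     split_pos = code_only.find('train_test_split(')
--
--     # Fix is correct only if train_test_split appears BEFORE scaler.fit in code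
--     if fit_pos == -1 or split_pos == -1:
--         return False
--     return split_pos < fit_pos
-- ===== SOURCE B (Python) =====
-- def _detect_fit_after_split(script: str) -> bool:
--     seen_split = False
--     for line in script.split('\n'):
--         t = line.strip()
--         if t == '' or t.startswith('import') or t.startswith('from') or t.startswith('#'):
--             continue
--         f = line.find('scaler.fit')
--         s = line.find('train_test_split(')
--         if f != -1:
--             return seen_split or (s != -1 and s < f)
--         if s != -1:
--             seen_split = True
--     return False
-- ===== Notes on version B (the rewrite author's own statement) =====
-- stated objective: simpler
-- what changed: Instead of materialising the filtered lines, joining them into one string and running two global find calls, B makes a single ordered pass over the lines with a seen-split flag and returns at the first line that contains the fit marker.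
import Mathlib
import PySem

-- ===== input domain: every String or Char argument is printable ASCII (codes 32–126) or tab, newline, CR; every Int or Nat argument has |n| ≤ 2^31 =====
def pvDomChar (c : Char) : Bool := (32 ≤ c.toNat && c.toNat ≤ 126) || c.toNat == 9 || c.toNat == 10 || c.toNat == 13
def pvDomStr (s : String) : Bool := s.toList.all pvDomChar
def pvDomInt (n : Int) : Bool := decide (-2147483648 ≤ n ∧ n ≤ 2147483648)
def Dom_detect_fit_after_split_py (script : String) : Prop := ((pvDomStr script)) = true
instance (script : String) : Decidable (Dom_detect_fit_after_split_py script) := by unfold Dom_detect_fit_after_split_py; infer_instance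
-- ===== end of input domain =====

-- B replaces A's join-then-two-global-finds by a single ordered pass over the lines
-- with a seen-split flag (objective: simpler, no joined string is built).

-- ===== PORT A =====
-- A's line filter (the list-comprehension condition, same order of conjuncts)
def pvKeep (l : String) : Bool :=
  !(PySem.Str.startswith (PySem.Str.strip l) "import")
  && !(PySem.Str.startswith (PySem.Str.strip l) "from")
  && !(PySem.Str.startswith (PySem.Str.strip l) "#")
  && !(PySem.Str.strip l == "")

def detect_fit_after_split_py (script : String) : Bool :=
  -- script.split('\n'); sep ≠ "" so Str.split? is always `some` (getD never fires)
  let lines := (PySem.Str.split? script "\n").getD []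
  let code_lines := lines.filter pvKeep
  let code_only := PySem.Str.join "\n" code_lines
  let fit_pos := PySem.Str.find code_only "scaler.fit"
  let split_pos := PySem.Str.find code_only "train_test_split("
  if fit_pos = -1 ∨ split_pos = -1 then false
  else decide (split_pos < fit_pos)

-- ===== PORT B =====
-- Source B's skip condition (t == '' or t.startswith(...) ...)
def pvSkip (l : String) : Bool :=
  let t := PySem.Str.strip l
  (t == "") || PySem.Str.startswith t "import"
  || PySem.Str.startswith t "from" || PySem.Str.startswith t "#"

-- the for-loop of Source B: early return at the first line containing 'scaler.fit'
def pvAltLoop (ls : List String) (seen : Bool) : Bool :=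
  match ls with
  | [] => false
  | line :: rest =>
    if pvSkip line then pvAltLoop rest seen
    else
      let f := PySem.Str.find line "scaler.fit"
      let s := PySem.Str.find line "train_test_split("
      if f ≠ -1 then seen || (s ≠ -1 && decide (s < f))
      else pvAltLoop rest (seen || s ≠ -1)

def detect_fit_after_split_py_alt (script : String) : Bool :=
  pvAltLoop ((PySem.Str.split? script "\n").getD []) false

-- ===== PRECONDITION & SPEC =====
def Spec_detect_fit_after_split_py (script : String) (out : Bool) : Prop := out = detect_fit_after_split_py_alt script
instance (script : String) (out : Bool) : Decidable (Spec_detect_fit_after_split_py script out) := by unfold Spec_detect_fit_after_split_py; infer_instance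

-- ===== CLAIM (what is proved, stated in full; the proofs are below) =====
def Claim_equal_detect_fit_after_split_py : Prop := ∀ (script : String), Dom_detect_fit_after_split_py script → Spec_detect_fit_after_split_py script (detect_fit_after_split_py script)

-- ===== LEMMAS AND PROOFS =====

theorem pv_find_nil (p : List Char) (hp : p ≠ []) : PySem.Chars.find [] p = -1 := by
  rw [PySem.Chars.find_eq_neg_one_iff]
  intro h
  exact hp (List.eq_nil_of_infix_nil h)

-- Chars.find points at the first occurrence; conversely a minimal occurrence determines it
theorem pv_find_eq_of (s p : List Char) (k : Nat) (h1 : p <+: s.drop k)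
    (h2 : ∀ i < k, ¬ p <+: s.drop i) : PySem.Chars.find s p = k := by
  have hin : PySem.Chars.isIn p s = true := by
    rw [← PySem.Chars.exists_prefix_drop_iff_isIn]; exact ⟨k, h1⟩
  have hnn : 0 ≤ PySem.Chars.find s p := by
    rw [PySem.Chars.find_nonneg_iff]; exact (PySem.Chars.isIn_iff_infix _ _).mp hin
  obtain ⟨hpre, hmin⟩ := PySem.Chars.find_spec hnn
  have h3 : ¬ (PySem.Chars.find s p).toNat < k := fun h => h2 _ h hpre
  have h4 : ¬ k < (PySem.Chars.find s p).toNat := fun h => hmin _ h h1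
  omega

theorem pv_find_ne_of_drop (s p : List Char) (i : Nat) (h : p <+: s.drop i) :
    PySem.Chars.find s p ≠ -1 := by
  rw [PySem.Chars.find_ne_neg_one_iff, ← PySem.Chars.isIn_iff_infix,
    ← PySem.Chars.exists_prefix_drop_iff_isIn]
  exact ⟨i, h⟩

-- no occurrence of a newline-free pattern can cross the '\n' joint
theorem pv_pfx_cross (p l r : List Char) (hn : '\n' ∉ p) (j : Nat) :
    p <+: (l ++ '\n' :: r).drop j ↔
      (j + p.length ≤ l.length ∧ p <+: l.drop j) ∨
      (l.length + 1 ≤ j ∧ p <+: r.drop (j - (l.length + 1))) := by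
  rw [List.drop_append]
  by_cases hj : j ≤ l.length
  · have hd : ('\n' :: r).drop (j - l.length) = '\n' :: r := by
      have : j - l.length = 0 := by omega
      simp [this]
    rw [hd]
    constructor
    · intro h
      by_cases hlen : p.length ≤ (l.drop j).length
      · left
        refine ⟨by simp at hlen; omega, ?_⟩
        have ht := List.prefix_iff_eq_take.mp h
        rw [List.take_append_of_le_length hlen] at ht
        exact ht ▸ List.take_prefix _ _
      · exfalso
        have hlt : (l.drop j).length < p.length := by omega
        have h1 := h.getElem (i := (l.drop j).length) hlt
        have h2 : (List.drop j l ++ '\n' :: r)[(List.drop j l).length]'(by simp) = '\n' := by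
          rw [List.getElem_append_right (le_refl _)]
          simp
        have h3 : p[(List.drop j l).length] = '\n' := h1.trans h2
        exact hn (h3 ▸ List.getElem_mem hlt)
    · intro h
      rcases h with ⟨_, h⟩ | ⟨h, _⟩
      · exact h.trans (List.prefix_append _ _)
      · omega
  · have hd : l.drop j = [] := by simp; omega
    have hd2 : ('\n' :: r).drop (j - l.length) = r.drop (j - (l.length + 1)) := by
      rw [show j - l.length = (j - (l.length + 1)) + 1 by omega, List.drop_succ_cons]
    rw [hd, List.nil_append, hd2]
    constructor
    · intro h; exact Or.inr ⟨by omega, h⟩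
    · rintro (⟨h, _⟩ | ⟨_, h⟩)
      · omega
      · exact h

-- find across 'line ++ '\n' ++ rest' for a nonempty newline-free pattern
theorem pv_find_concat (p l R : List Char) (hn : '\n' ∉ p) :
    PySem.Chars.find (l ++ '\n' :: R) p =
      if PySem.Chars.find l p ≠ -1 then PySem.Chars.find l p
      else if PySem.Chars.find R p = -1 then -1
      else (l.length + 1 : Int) + PySem.Chars.find R p := by
  by_cases h1 : PySem.Chars.find l p = -1
  · by_cases h2 : PySem.Chars.find R p = -1
    · simp only [h1, h2, ne_eq, not_true_eq_false, if_false, if_true]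
      rw [PySem.Chars.find_eq_neg_one_iff, ← PySem.Chars.isIn_iff_infix,
        ← PySem.Chars.exists_prefix_drop_iff_isIn]
      rintro ⟨j, hj⟩
      rcases (pv_pfx_cross p l R hn j).mp hj with ⟨_, h⟩ | ⟨_, h⟩
      · exact pv_find_ne_of_drop l p j h h1
      · exact pv_find_ne_of_drop R p _ h h2
    · have hnn : 0 ≤ PySem.Chars.find R p := by
        have := PySem.Chars.neg_one_le_find R p; omega
      obtain ⟨hpre, hmin⟩ := PySem.Chars.find_spec hnn
      simp only [h1, h2, ne_eq, not_true_eq_false, if_false]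
      have hk := pv_find_eq_of (l ++ '\n' :: R) p (l.length + 1 + (PySem.Chars.find R p).toNat)
        (by
          rw [pv_pfx_cross p l R hn]
          exact Or.inr ⟨by omega, by rwa [show l.length + 1 + (PySem.Chars.find R p).toNat - (l.length + 1)
            = (PySem.Chars.find R p).toNat by omega]⟩)
        (by
          intro i hi hpi
          rcases (pv_pfx_cross p l R hn i).mp hpi with ⟨_, h⟩ | ⟨hge, h⟩
          · exact pv_find_ne_of_drop l p i h h1
          · exact hmin (i - (l.length + 1)) (by omega) h)
      rw [hk]
      push_cast
      omega
  · have hnn : 0 ≤ PySem.Chars.find l p := by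
      have := PySem.Chars.neg_one_le_find l p; omega
    obtain ⟨hpre, hmin⟩ := PySem.Chars.find_spec hnn
    simp only [h1, ne_eq, not_false_eq_true, if_true]
    have hfit : (PySem.Chars.find l p).toNat + p.length ≤ l.length := by
      have h5 := hpre.length_le
      simp only [List.length_drop] at h5
      have := PySem.Chars.find_le_length l p
      omega
    have hk := pv_find_eq_of (l ++ '\n' :: R) p (PySem.Chars.find l p).toNat
      (by rw [pv_pfx_cross p l R hn]; exact Or.inl ⟨hfit, hpre⟩)
      (by
        intro i hi hpi
        rcases (pv_pfx_cross p l R hn i).mp hpi with ⟨_, h⟩ | ⟨hge, h⟩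
        · exact hmin i hi h
        · have := PySem.Chars.find_le_length l p; omega)
    rw [hk]
    omega

-- find on a '\n'-join, one line peeled off
theorem pv_find_join_cons (p l : List Char) (ls : List (List Char)) (hp : p ≠ []) (hn : '\n' ∉ p) :
    PySem.Chars.find (PySem.Chars.join ['\n'] (l :: ls)) p =
      if PySem.Chars.find l p ≠ -1 then PySem.Chars.find l p
      else if PySem.Chars.find (PySem.Chars.join ['\n'] ls) p = -1 then -1
      else (l.length + 1 : Int) + PySem.Chars.find (PySem.Chars.join ['\n'] ls) p := by
  cases ls with
  | nil =>
    rw [PySem.Chars.join_singleton, PySem.Chars.join_nil, pv_find_nil p hp]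
    split
    · rfl
    · simp_all
  | cons h t =>
    rw [PySem.Chars.join_cons_cons, List.append_assoc, List.singleton_append,
      pv_find_concat p l _ hn]

-- B's skip condition is the negation of A's keep condition
theorem pv_keep_skip (l : String) : pvSkip l = !pvKeep l := by
  simp only [pvSkip, pvKeep]
  cases PySem.Str.startswith (PySem.Str.strip l) "import" <;>
    cases PySem.Str.startswith (PySem.Str.strip l) "from" <;>
    cases PySem.Str.startswith (PySem.Str.strip l) "#" <;>
    cases (PySem.Str.strip l == "") <;> rfl

-- invariant of B's loop: it computes A's joined-string comparison
theorem pv_loop_eq (ls : List String) (seen : Bool) :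
    pvAltLoop ls seen =
      (let cs := PySem.Chars.join ['\n'] ((ls.filter pvKeep).map String.toList)
       let F := PySem.Chars.find cs "scaler.fit".toList
       let S := PySem.Chars.find cs "train_test_split(".toList
       if F = -1 then false else seen || (S ≠ -1 && decide (S < F))) := by
  induction ls generalizing seen with
  | nil =>
    have e1 := pv_find_nil "scaler.fit".toList (by decide)
    have e2 := pv_find_nil "train_test_split(".toList (by decide)
    simp only [pvAltLoop, List.filter_nil, List.map_nil, PySem.Chars.join_nil, e1, e2]
    simp
  | cons line rest ih =>
    by_cases hk : pvKeep line
    · have hsk : pvSkip line = false := by rw [pv_keep_skip, hk]; rfl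
      simp only [pvAltLoop, hsk, if_false, Bool.false_eq_true, List.filter_cons_of_pos hk,
        List.map_cons, PySem.Str.find_eq]
      set f := PySem.Chars.find line.toList "scaler.fit".toList with hf
      set s := PySem.Chars.find line.toList "train_test_split(".toList with hs
      set F' := PySem.Chars.find (PySem.Chars.join ['\n'] ((rest.filter pvKeep).map String.toList)) "scaler.fit".toList with hF'
      set S' := PySem.Chars.find (PySem.Chars.join ['\n'] ((rest.filter pvKeep).map String.toList)) "train_test_split(".toList with hS'
      have hFc := pv_find_join_cons "scaler.fit".toList line.toList ((rest.filter pvKeep).map String.toList) (by decide) (by decide)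
      have hSc := pv_find_join_cons "train_test_split(".toList line.toList ((rest.filter pvKeep).map String.toList) (by decide) (by decide)
      simp only [ih, ← hf, ← hs, ← hF', ← hS'] at hFc hSc ⊢
      simp only [hFc, hSc]
      have hfl : f ≤ (line.toList.length : Int) := hf ▸ PySem.Chars.find_le_length _ _
      have hsl : s ≤ (line.toList.length : Int) := hs ▸ PySem.Chars.find_le_length _ _
      have hF'g : -1 ≤ F' := hF' ▸ PySem.Chars.neg_one_le_find _ _
      have hS'g : -1 ≤ S' := hS' ▸ PySem.Chars.neg_one_le_find _ _
      cases seen <;> split_ifs <;> simp_all <;> omega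
    · have hk' : pvKeep line = false := by simpa using hk
      have hsk : pvSkip line = true := by rw [pv_keep_skip, hk']; rfl
      have hfil : List.filter pvKeep (line :: rest) = List.filter pvKeep rest :=
        List.filter_cons_of_neg (by simp [hk'])
      simp only [pvAltLoop, hsk, if_true, hfil]
      exact ih seen

-- ===== VERDICT (by name: the statement is the Claim_ definition above) =====
theorem detect_fit_after_split_py_spec : Claim_equal_detect_fit_after_split_py := by
  intro script _
  unfold Spec_detect_fit_after_split_py detect_fit_after_split_py detect_fit_after_split_py_alt
  rw [pv_loop_eq]
  have hnl : ("\n" : String).toList = ['\n'] := rfl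
  simp only [PySem.Str.find_eq, PySem.Str.toList_join, hnl]
  set F := PySem.Chars.find (PySem.Chars.join ['\n']
    ((((PySem.Str.split? script "\n").getD []).filter pvKeep).map String.toList)) "scaler.fit".toList with hF
  set S := PySem.Chars.find (PySem.Chars.join ['\n']
    ((((PySem.Str.split? script "\n").getD []).filter pvKeep).map String.toList)) "train_test_split(".toList with hS
  by_cases h1 : F = -1
  · simp [h1]
  · by_cases h2 : S = -1 <;> simp [h1, h2]
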